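-- pv_equiv track=rewrite | github.com/Ashsari/spam_review_detection | Clustering_words_SOM.py | find_maped_words
-- ===== SOURCE A (Python) =====
-- def find_maped_words(vocab_dict, vocabulary_ham, vocabulary_spam ):
--     '''
--     creates 3 dictionaries of winning cell addresses: one for the common words on ham and spam, one for words on ham and one for words on spam
--     '''
--     common_wd ={}
--     ham_wd ={}
--     spam_wd={}
--     for key in vocab_dict:
--         voc_list = vocab_dict[key]
--         cw = [] ; hw = [] ; sw = []
--         for word in voc_list:
--             if (word in vocabulary_ham) & (word in vocabulary_spam):
--                 cw.append(word)
--             elif (word in vocabulary_ham):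
--                 hw.append(word)
--             else:
--                 sw.append(word)
--         if len(cw) != 0:
--             common_wd[key] = cw
--         if len(hw) != 0:
--             ham_wd[key] = hw
--         if len(sw) != 0:
--             spam_wd[key] = sw
--     return common_wd, ham_wd, spam_wd
-- ===== SOURCE B (Python) =====
-- def find_maped_words(vocab_dict, vocabulary_ham, vocabulary_spam):
--     '''
--     creates 3 dictionaries of winning cell addresses: one for the common words on ham and spam, one for words on ham and one for words on spam
--     '''
--     ham = set(vocabulary_ham)
--     spam = set(vocabulary_spam)
--
--     def bucket(select):
--         out = {}
--         for key, words in vocab_dict.items():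
--             chosen = [w for w in words if select(w)]
--             if chosen:
--                 out[key] = chosen
--         return out
--
--     return (bucket(lambda w: w in ham and w in spam),
--             bucket(lambda w: w in ham and w not in spam),
--             bucket(lambda w: w not in ham))
-- ===== Notes on version B (the rewrite author's own statement) =====
-- stated objective: faster
-- what changed: Replaces the single loop with three per-bucket if/elif accumulators and repeated O(|vocab|) list-membership scans by one-time set conversion of both vocabularies plus three independent filter passes (one per bucket) with O(1) membership tests.
import Mathlib
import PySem

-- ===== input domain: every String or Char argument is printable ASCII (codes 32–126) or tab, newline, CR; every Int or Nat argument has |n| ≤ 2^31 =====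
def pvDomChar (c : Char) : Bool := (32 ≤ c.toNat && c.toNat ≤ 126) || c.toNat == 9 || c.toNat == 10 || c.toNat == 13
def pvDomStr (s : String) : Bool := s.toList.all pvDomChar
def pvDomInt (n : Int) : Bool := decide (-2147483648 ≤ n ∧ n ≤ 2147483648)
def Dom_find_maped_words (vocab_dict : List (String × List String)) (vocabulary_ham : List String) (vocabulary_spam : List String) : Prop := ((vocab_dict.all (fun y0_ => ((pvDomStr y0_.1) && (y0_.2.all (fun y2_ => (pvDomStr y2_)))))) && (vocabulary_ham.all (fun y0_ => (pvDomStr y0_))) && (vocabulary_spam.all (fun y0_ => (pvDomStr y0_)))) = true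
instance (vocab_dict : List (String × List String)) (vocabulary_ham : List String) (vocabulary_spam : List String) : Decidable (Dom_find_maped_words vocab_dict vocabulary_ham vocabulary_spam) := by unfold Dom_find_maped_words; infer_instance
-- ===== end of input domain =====

-- B converts the two vocabularies to sets once and builds each bucket by its own filter pass (objective: faster membership tests).
-- vocab_dict is a Python dict: both ports receive it as an association list and normalise it with PySem.Dict.ofList.

-- ===== PORT A =====
-- Literal transliteration of A: one loop over the dict's keys, looking each key up,
-- an inner if/elif/else loop filling three accumulators, then conditional dict insertion.
def find_maped_words (vocab_dict : List (String × List String)) (vocabulary_ham : List String) (vocabulary_spam : List String) : (List (String × List String)) × (List (String × List String)) × (List (String × List String)) :=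
  let vd : PySem.Dict String (List String) := PySem.Dict.ofList vocab_dict
  let res := vd.keys.foldl
    (fun (acc : PySem.Dict String (List String) × PySem.Dict String (List String) × PySem.Dict String (List String)) key =>
      let voc_list := vd.getD key []   -- vocab_dict[key]; KeyError impossible: key is iterated from the dict itself
      let cls := voc_list.foldl
        (fun (t : List String × List String × List String) word =>
          if vocabulary_ham.contains word && vocabulary_spam.contains word then
            (t.1 ++ [word], t.2.1, t.2.2)
          else if vocabulary_ham.contains word then
            (t.1, t.2.1 ++ [word], t.2.2)
          else
            (t.1, t.2.1, t.2.2 ++ [word])) ([], [], [])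
      let acc1 := if cls.1.length ≠ 0 then acc.1.insert key cls.1 else acc.1
      let acc2 := if cls.2.1.length ≠ 0 then acc.2.1.insert key cls.2.1 else acc.2.1
      let acc3 := if cls.2.2.length ≠ 0 then acc.2.2.insert key cls.2.2 else acc.2.2
      (acc1, acc2, acc3))
    (PySem.Dict.empty, PySem.Dict.empty, PySem.Dict.empty)
  (res.1.items, res.2.1.items, res.2.2.items)

-- ===== PORT B =====
-- bucket(select) of Source B: one pass over the items, filtering each word list by the predicate
def pvBucket (vd : PySem.Dict String (List String)) (select : String → Bool) : List (String × List String) :=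
  (vd.items.foldl
    (fun (out : PySem.Dict String (List String)) kv =>
      let chosen := kv.2.filter select
      if chosen.isEmpty then out else out.insert kv.1 chosen)
    PySem.Dict.empty).items

def find_maped_words_alt (vocab_dict : List (String × List String)) (vocabulary_ham : List String) (vocabulary_spam : List String) : (List (String × List String)) × (List (String × List String)) × (List (String × List String)) :=
  let ham : PySem.Set String := PySem.Set.ofList vocabulary_ham
  let spam : PySem.Set String := PySem.Set.ofList vocabulary_spam
  let vd : PySem.Dict String (List String) := PySem.Dict.ofList vocab_dict
  (pvBucket vd (fun w => PySem.Set.contains ham w && PySem.Set.contains spam w),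
   pvBucket vd (fun w => PySem.Set.contains ham w && !PySem.Set.contains spam w),
   pvBucket vd (fun w => !PySem.Set.contains ham w))

-- ===== PRECONDITION & SPEC =====
def Spec_find_maped_words (vocab_dict : List (String × List String)) (vocabulary_ham : List String) (vocabulary_spam : List String) (out : (List (String × List String)) × (List (String × List String)) × (List (String × List String))) : Prop := out = find_maped_words_alt vocab_dict vocabulary_ham vocabulary_spam
instance (vocab_dict : List (String × List String)) (vocabulary_ham : List String) (vocabulary_spam : List String) (out : (List (String × List String)) × (List (String × List String)) × (List (String × List String))) : Decidable (Spec_find_maped_words vocab_dict vocabulary_ham vocabulary_spam out) := by unfold Spec_find_maped_words; infer_instance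

-- ===== CLAIM (what is proved, stated in full; the proofs are below) =====
def Claim_equal_find_maped_words : Prop := ∀ (vocab_dict : List (String × List String)) (vocabulary_ham : List String) (vocabulary_spam : List String), Dom_find_maped_words vocab_dict vocabulary_ham vocabulary_spam → Spec_find_maped_words vocab_dict vocabulary_ham vocabulary_spam (find_maped_words vocab_dict vocabulary_ham vocabulary_spam)

-- ===== LEMMAS AND PROOFS =====

-- set(l) membership agrees with list membership
theorem pv_set_contains (l : List String) (w : String) :
    PySem.Set.contains (PySem.Set.ofList l) w = l.contains w := by
  simp [PySem.Set.contains, PySem.Set.mem_ofList]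

-- A's inner classification loop produces the three filters
theorem pv_classify (ham spam : List String) (ws a b c : List String) :
    ws.foldl
      (fun (t : List String × List String × List String) word =>
        if ham.contains word && spam.contains word then (t.1 ++ [word], t.2.1, t.2.2)
        else if ham.contains word then (t.1, t.2.1 ++ [word], t.2.2)
        else (t.1, t.2.1, t.2.2 ++ [word])) (a, b, c)
    = (a ++ ws.filter (fun w => ham.contains w && spam.contains w),
       b ++ ws.filter (fun w => ham.contains w && !spam.contains w),
       c ++ ws.filter (fun w => !ham.contains w)) := by
  induction ws generalizing a b c with
  | nil => simp
  | cons w ws ih =>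
    rw [List.foldl_cons]
    split_ifs with h1 h2 <;> rw [ih] <;> simp_all

-- a fold whose step acts componentwise is the triple of the component folds
theorem pv_foldl_prod3 {α β γ δ : Type} (f : α → δ → α) (g : β → δ → β) (h : γ → δ → γ)
    (l : List δ) (a : α) (b : β) (c : γ) :
    l.foldl (fun t x => (f t.1 x, g t.2.1 x, h t.2.2 x)) (a, b, c)
    = (l.foldl f a, l.foldl g b, l.foldl h c) := by
  induction l generalizing a b c with
  | nil => rfl
  | cons x xs ih => simpa using ih (f a x) (g b x) (h c x)

-- iterating a dict's keys and looking each key up is iterating its items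
theorem pv_foldl_keys_items {κ ν α : Type} [BEq κ] [LawfulBEq κ]
    (d : PySem.Dict κ ν) (hnd : d.keys.Nodup) (dflt : ν) (G : α → κ → ν → α) (init : α) :
    d.keys.foldl (fun acc k => G acc k (d.getD k dflt)) init
      = d.items.foldl (fun acc kv => G acc kv.1 kv.2) init := by
  rw [PySem.Dict.items_eq_map_keys d hnd dflt, List.foldl_map]

-- conditional insertion: A tests length != 0, B tests emptiness
theorem pv_if_insert (l : List String) (d : PySem.Dict String (List String)) (k : String) :
    (if l.length ≠ 0 then d.insert k l else d) = (if l.isEmpty then d else d.insert k l) := by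
  cases l <;> simp

-- the two programs return the same triple
theorem pv_main (vocab_dict : List (String × List String)) (vocabulary_ham vocabulary_spam : List String) :
    find_maped_words vocab_dict vocabulary_ham vocabulary_spam
      = find_maped_words_alt vocab_dict vocabulary_ham vocabulary_spam := by
  simp only [find_maped_words, find_maped_words_alt, pvBucket]
  simp only [pv_classify, List.nil_append, pv_if_insert]
  rw [pv_foldl_keys_items (PySem.Dict.ofList vocab_dict)
      (PySem.Dict.nodup_keys_ofList vocab_dict) []
      (fun acc key voc =>
        (if (voc.filter (fun w => vocabulary_ham.contains w && vocabulary_spam.contains w)).isEmpty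
           then acc.1 else acc.1.insert key (voc.filter (fun w => vocabulary_ham.contains w && vocabulary_spam.contains w)),
         if (voc.filter (fun w => vocabulary_ham.contains w && !vocabulary_spam.contains w)).isEmpty
           then acc.2.1 else acc.2.1.insert key (voc.filter (fun w => vocabulary_ham.contains w && !vocabulary_spam.contains w)),
         if (voc.filter (fun w => !vocabulary_ham.contains w)).isEmpty
           then acc.2.2 else acc.2.2.insert key (voc.filter (fun w => !vocabulary_ham.contains w))))
      (PySem.Dict.empty, PySem.Dict.empty, PySem.Dict.empty)]
  rw [pv_foldl_prod3
      (fun (d : PySem.Dict String (List String)) (kv : String × List String) =>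
        if (kv.2.filter (fun w => vocabulary_ham.contains w && vocabulary_spam.contains w)).isEmpty
          then d else d.insert kv.1 (kv.2.filter (fun w => vocabulary_ham.contains w && vocabulary_spam.contains w)))
      (fun (d : PySem.Dict String (List String)) (kv : String × List String) =>
        if (kv.2.filter (fun w => vocabulary_ham.contains w && !vocabulary_spam.contains w)).isEmpty
          then d else d.insert kv.1 (kv.2.filter (fun w => vocabulary_ham.contains w && !vocabulary_spam.contains w)))
      (fun (d : PySem.Dict String (List String)) (kv : String × List String) =>
        if (kv.2.filter (fun w => !vocabulary_ham.contains w)).isEmpty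
          then d else d.insert kv.1 (kv.2.filter (fun w => !vocabulary_ham.contains w)))]
  simp only [pv_set_contains]

-- ===== VERDICT (by name: the statement is the Claim_ definition above) =====
theorem find_maped_words_spec : Claim_equal_find_maped_words := by
  intro vocab_dict vocabulary_ham vocabulary_spam _
  exact pv_main vocab_dict vocabulary_ham vocabulary_spam
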